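-- pv_equiv track=rewrite | github.com/nicholasuva/fst-lr | dataset_preproc.py | check_for_url
-- ===== SOURCE A (Python) =====
-- def check_for_url(
--         sent: str
--         ) -> bool:
--     """
--     checks a string for various web address and programming language related keywords
--     """
--     url_txt = {'https://', 'www.', 'WWW.', '.com', '.COM', 'javascript', 'Javascript', '@'}
--     for item in url_txt:
--         if item in sent:
--             return True
--     return False
-- ===== SOURCE B (Python) =====
-- def check_for_url(
--         sent: str
--         ) -> bool:
--     """
--     checks a string for various web address and programming language related keywords
--     """
--     table = {'h': ['ttps://'], 'w': ['ww.'], 'W': ['WW.'],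
--              '.': ['com', 'COM'], 'j': ['avascript'], 'J': ['avascript'],
--              '@': ['']}
--     for i, c in enumerate(sent):
--         for tail in table.get(c, []):
--             if sent.startswith(tail, i + 1):
--                 return True
--     return False
-- ===== Notes on version B (the rewrite author's own statement) =====
-- stated objective: alternative
-- what changed: Replaced eight independent whole-string substring scans (one per keyword) by a single left-to-right pass that at each character dispatches through a dict keyed by each keyword's first character and checks only the matching keyword tails there.
import Mathlib
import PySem

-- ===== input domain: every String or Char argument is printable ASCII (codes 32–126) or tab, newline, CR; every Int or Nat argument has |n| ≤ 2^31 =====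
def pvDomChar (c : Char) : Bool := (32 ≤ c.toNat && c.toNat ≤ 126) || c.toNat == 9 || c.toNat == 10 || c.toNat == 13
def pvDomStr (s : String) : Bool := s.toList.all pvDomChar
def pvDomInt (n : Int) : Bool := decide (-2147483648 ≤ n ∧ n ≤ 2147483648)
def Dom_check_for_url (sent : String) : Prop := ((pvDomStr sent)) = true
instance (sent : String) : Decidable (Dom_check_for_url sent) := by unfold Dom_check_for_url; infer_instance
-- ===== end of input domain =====

-- B replaces eight separate whole-string substring scans by a single left-to-right pass
-- that dispatches through a first-character-keyed table of keyword tails (alternative, same cost).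


-- ===== PORT A =====
-- the set literal url_txt (insertion order; all eight literals are distinct)
def urlTxtA : PySem.Set String :=
  PySem.Set.ofList ["https://", "www.", "WWW.", ".com", ".COM", "javascript", "Javascript", "@"]

-- `for item in url_txt: if item in sent: return True` / `return False`
def checkLoopA : List String → List Char → Bool
  | [], _ => false
  | p :: ps, s => if PySem.Chars.isIn p.toList s then true else checkLoopA ps s

def check_for_url (sent : String) : Bool :=
  checkLoopA urlTxtA sent.toList

-- ===== PORT B =====
-- the dict literal `table` mapping a first character to the keyword tails starting after it
def tableB : PySem.Dict Char (List String) :=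
  PySem.Dict.ofList [('h', ["ttps://"]), ('w', ["ww."]), ('W', ["WW."]),
    ('.', ["com", "COM"]), ('j', ["avascript"]), ('J', ["avascript"]), ('@', [""])]

-- `for i, c in enumerate(sent): for tail in table.get(c, []): if sent.startswith(tail, i+1): return True`
-- / `return False`; `sent.startswith(tail, i+1)` is startswith of the remaining characters after c.
def scanB : List Char → Bool
  | [] => false
  | c :: rest =>
      if (PySem.Dict.getD tableB c []).any (fun t => PySem.Chars.startswith rest t.toList) then true
      else scanB rest

def check_for_url_alt (sent : String) : Bool :=
  scanB sent.toList

-- ===== PRECONDITION & SPEC =====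
def Spec_check_for_url (sent : String) (out : Bool) : Prop := out = check_for_url_alt sent
instance (sent : String) (out : Bool) : Decidable (Spec_check_for_url sent out) := by unfold Spec_check_for_url; infer_instance

-- ===== CLAIM (what is proved, stated in full; the proofs are below) =====
def Claim_equal_check_for_url : Prop := ∀ (sent : String), Dom_check_for_url sent → Spec_check_for_url sent (check_for_url sent)

-- ===== LEMMAS AND PROOFS =====
def patsL : List String :=
  ["https://", "www.", "WWW.", ".com", ".COM", "javascript", "Javascript", "@"]

set_option maxHeartbeats 1000000 in
theorem items_tableB : tableB.items =
    [('h', ["ttps://"]), ('w', ["ww."]), ('W', ["WW."]),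
     ('.', ["com", "COM"]), ('j', ["avascript"]), ('J', ["avascript"]), ('@', [""])] := by decide

theorem toListHttps : "https://".toList = 'h' :: "ttps://".toList := rfl
theorem toListWww : "www.".toList = 'w' :: "ww.".toList := rfl
theorem toListWWW : "WWW.".toList = 'W' :: "WW.".toList := rfl
theorem toListCom : ".com".toList = '.' :: "com".toList := rfl
theorem toListCOM : ".COM".toList = '.' :: "COM".toList := rfl
theorem toListJs : "javascript".toList = 'j' :: "avascript".toList := rfl
theorem toListJS : "Javascript".toList = 'J' :: "avascript".toList := rfl
theorem toListAt : "@".toList = '@' :: "".toList := rfl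

-- the table dispatch at one position finds exactly the keywords that start there
set_option maxHeartbeats 1000000 in
theorem dispatch_iff (c : Char) (rest : List Char) :
    ((PySem.Dict.getD tableB c []).any (fun t => PySem.Chars.startswith rest t.toList)) = true
      ↔ ∃ p ∈ patsL, p.toList <+: c :: rest := by
  rw [PySem.Dict.getD, PySem.Dict.get?, items_tableB]
  simp only [patsL, List.mem_cons, List.not_mem_nil, or_false, exists_eq_or_imp,
    exists_eq_left, toListHttps, toListWww, toListWWW, toListCom, toListCOM,
    toListJs, toListJS, toListAt, List.cons_prefix_cons, List.find?]
  by_cases h1 : c = 'h'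
  · subst h1; simp [PySem.Chars.startswith_iff]
  by_cases h2 : c = 'w'
  · subst h2; simp [PySem.Chars.startswith_iff]
  by_cases h3 : c = 'W'
  · subst h3; simp [PySem.Chars.startswith_iff]
  by_cases h4 : c = '.'
  · subst h4; simp [PySem.Chars.startswith_iff]
  by_cases h5 : c = 'j'
  · subst h5; simp [PySem.Chars.startswith_iff]
  by_cases h6 : c = 'J'
  · subst h6; simp [PySem.Chars.startswith_iff]
  by_cases h7 : c = '@'
  · subst h7; simp [PySem.Chars.startswith_iff]
  · have e1 : ('h' == c) = false := by simp [Ne.symm h1]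
    have e2 : ('w' == c) = false := by simp [Ne.symm h2]
    have e3 : ('W' == c) = false := by simp [Ne.symm h3]
    have e4 : ('.' == c) = false := by simp [Ne.symm h4]
    have e5 : ('j' == c) = false := by simp [Ne.symm h5]
    have e6 : ('J' == c) = false := by simp [Ne.symm h6]
    have e7 : ('@' == c) = false := by simp [Ne.symm h7]
    simp [e1, e2, e3, e4, e5, e6, e7]
    exact ⟨fun h => (h1 h.symm).elim, fun h => (h2 h.symm).elim, fun h => (h3 h.symm).elim,
      fun h => (h4 h.symm).elim, fun h => (h4 h.symm).elim, fun h => (h5 h.symm).elim,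
      fun h => (h6 h.symm).elim, fun h => h7 h.symm⟩

theorem checkLoopA_iff (ps : List String) (s : List Char) :
    checkLoopA ps s = true ↔ ∃ p ∈ ps, p.toList <:+: s := by
  induction ps with
  | nil => simp [checkLoopA]
  | cons p ps ih =>
      simp only [checkLoopA]
      cases h : PySem.Chars.isIn p.toList s with
      | true =>
          rw [if_pos rfl]
          exact iff_of_true rfl
            ⟨p, List.mem_cons_self, (PySem.Chars.isIn_iff_infix p.toList s).mp h⟩
      | false =>
          rw [if_neg (by decide), ih]
          constructor
          · rintro ⟨q, hq, hi⟩; exact ⟨q, List.mem_cons_of_mem _ hq, hi⟩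
          · rintro ⟨q, hq, hi⟩
            rcases List.mem_cons.mp hq with rfl | hq
            · have hx := (PySem.Chars.isIn_iff_infix q.toList s).mpr hi
              rw [h] at hx; cases hx
            · exact ⟨q, hq, hi⟩

theorem scanB_iff (s : List Char) :
    scanB s = true ↔ ∃ p ∈ patsL, ∃ j, p.toList <+: s.drop j := by
  induction s with
  | nil =>
      simp only [scanB, Bool.false_eq_true, false_iff]
      rintro ⟨p, hp, j, hpre⟩
      have : p.toList = [] := List.prefix_nil.mp (by simpa using hpre)
      fin_cases hp <;> simp_all
  | cons c rest ih =>
      simp only [scanB]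
      cases h : (PySem.Dict.getD tableB c []).any (fun t => PySem.Chars.startswith rest t.toList) with
      | true =>
          rw [if_pos rfl]
          rcases (dispatch_iff c rest).mp h with ⟨p, hp, hpre⟩
          exact iff_of_true rfl ⟨p, hp, 0, by simpa using hpre⟩
      | false =>
          rw [if_neg (by decide), ih]
          constructor
          · rintro ⟨p, hp, j, hpre⟩
            exact ⟨p, hp, j + 1, by simpa using hpre⟩
          · rintro ⟨p, hp, j, hpre⟩
            cases j with
            | zero =>
                have hx := (dispatch_iff c rest).mpr ⟨p, hp, by simpa using hpre⟩
                rw [h] at hx; cases hx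
            | succ j => exact ⟨p, hp, j, by simpa using hpre⟩

-- ===== VERDICT =====
theorem check_for_url_spec : Claim_equal_check_for_url := by
  intro sent _
  unfold Spec_check_for_url check_for_url check_for_url_alt
  have hset : (urlTxtA : List String) = patsL := by decide
  rw [hset]
  cases hb : scanB sent.toList with
  | false =>
      cases ha : checkLoopA patsL sent.toList with
      | false => rfl
      | true =>
          exfalso
          rcases (checkLoopA_iff _ _).mp ha with ⟨p, hp, hinf⟩
          rcases List.infix_iff_prefix_suffix.mp hinf with ⟨t, hpre, hsuf⟩
          rcases hsuf with ⟨u, huv⟩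
          have hdrop : sent.toList.drop u.length = t := by rw [← huv]; simp
          have hx := (scanB_iff sent.toList).mpr ⟨p, hp, u.length, hdrop ▸ hpre⟩
          rw [hb] at hx; cases hx
  | true =>
      rcases (scanB_iff _).mp hb with ⟨p, hp, j, hpre⟩
      exact (checkLoopA_iff _ _).mpr
        ⟨p, hp, List.infix_iff_prefix_suffix.mpr ⟨sent.toList.drop j, hpre, List.drop_suffix j _⟩⟩
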